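-- pv_equiv track=rewrite | github.com/taka-ohashi/Computer-Security | a1/testing.py | countTuples
-- ===== SOURCE A (Python) =====
-- def countTuples(text, doubles):
--    text = filter_non_alpha(text)
--    tuples = {}
--    length = len(text)
--    i = 0
--    while i < (length - 1):
--       currDub = ""
--       currDub += text[i] + text[i+1]
--       # searche {doubles} for currentdouble
--       if currDub in tuples:
--          tuples[currDub] += 1
--       else:
--          tuples[currDub] = 1
--       i += 1
--    return tuples
--
-- def filter_non_alpha(str_text):
--    temp_text = ""
--    for i in str_text:
--       if ord(i) >= 65 and ord(i) <= 122 and i.isalpha():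
--          temp_text += i
--    str_text = temp_text
--    return str_text
-- ===== SOURCE B (Python) =====
-- def countTuples(text, doubles):
--    counts = {}
--    prev = None
--    for c in text:
--       if ord(c) >= 65 and ord(c) <= 122 and c.isalpha():
--          if prev is not None:
--             pair = prev + c
--             if pair in counts:
--                counts[pair] += 1
--             else:
--                counts[pair] = 1
--          prev = c
--    return counts
-- ===== Notes on version B (the rewrite author's own statement) =====
-- stated objective: simpler
-- what changed: Single pass over the raw text keeping only the previous kept character as state, instead of building an intermediate filtered string (quadratic += concatenation) and then scanning it by index.
import Mathlib
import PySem

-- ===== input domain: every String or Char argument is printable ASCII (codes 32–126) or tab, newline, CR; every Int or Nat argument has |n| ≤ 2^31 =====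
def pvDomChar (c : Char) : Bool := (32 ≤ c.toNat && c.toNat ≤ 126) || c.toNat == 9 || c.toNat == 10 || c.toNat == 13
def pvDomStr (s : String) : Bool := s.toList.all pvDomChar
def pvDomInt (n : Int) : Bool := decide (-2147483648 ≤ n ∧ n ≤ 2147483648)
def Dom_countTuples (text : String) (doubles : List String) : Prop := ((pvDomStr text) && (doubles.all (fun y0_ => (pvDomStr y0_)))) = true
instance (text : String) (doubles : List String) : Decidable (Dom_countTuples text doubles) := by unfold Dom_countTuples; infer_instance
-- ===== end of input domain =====

-- B replaces A's filter-then-index-scan by a single pass over the raw text that keeps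
-- only the previous kept character as state (objective: simpler).

-- the character test 'ord(c) >= 65 and ord(c) <= 122 and c.isalpha()' (identical in both sources)
def pvKeep (c : Char) : Bool :=
  decide (65 ≤ c.toNat) && decide (c.toNat ≤ 122) && PySem.Chars.isalpha c

-- the dict update 'if k in d: d[k] += 1 else: d[k] = 1' (identical in both sources)
def pvBump (d : PySem.Dict String Int) (k : String) : PySem.Dict String Int :=
  if d.contains k then d.insert k (d.getD k 0 + 1) else d.insert k 1

-- ===== PORT A =====
def filter_non_alpha (str_text : String) : List Char :=
  str_text.toList.foldl (fun temp i => if pvKeep i then temp ++ [i] else temp) []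

def countTuples (text : String) (doubles : List String) : List (String × Int) :=
  let t := filter_non_alpha text
  let length : Int := t.length
  ((PySem.List.pyRange 0 (length - 1) 1).foldl
    (fun tuples i =>
      pvBump tuples (String.mk [PySem.List.pyGetD t i ' ', PySem.List.pyGetD t (i + 1) ' ']))
    PySem.Dict.empty).items

-- ===== PORT B =====
def countTuples_alt (text : String) (doubles : List String) : List (String × Int) :=
  (text.toList.foldl
    (fun (s : Option Char × PySem.Dict String Int) c =>
      if pvKeep c then
        (some c,
          match s.1 with
          | some p => pvBump s.2 (String.mk [p, c])
          | none => s.2)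
      else s)
    (none, PySem.Dict.empty)).2.items

-- ===== PRECONDITION & SPEC =====
def Spec_countTuples (text : String) (doubles : List String) (out : List (String × Int)) : Prop := out = countTuples_alt text doubles
instance (text : String) (doubles : List String) (out : List (String × Int)) : Decidable (Spec_countTuples text doubles out) := by unfold Spec_countTuples; infer_instance

-- ===== CLAIM (what is proved, stated in full; the proofs are below) =====
def Claim_equal_countTuples : Prop := ∀ (text : String) (doubles : List String), Dom_countTuples text doubles → Spec_countTuples text doubles (countTuples text doubles)

-- ===== LEMMAS AND PROOFS =====

-- common intermediate form: fold over the kept characters, bumping each adjacent pair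
def pairsFold : List Char → Option Char → PySem.Dict String Int → PySem.Dict String Int
  | [], _, d => d
  | c :: cs, none, d => pairsFold cs (some c) d
  | c :: cs, some p, d => pairsFold cs (some c) (pvBump d (String.mk [p, c]))

theorem pairsFold_short (l : List Char) (d : PySem.Dict String Int) (h : l.length ≤ 1) :
    pairsFold l none d = d := by
  match l, h with
  | [], _ => rfl
  | [c], _ => rfl

theorem filter_non_alpha_eq (s : String) : filter_non_alpha s = s.toList.filter pvKeep := by
  unfold filter_non_alpha
  simpa using PySem.List.foldl_append_if (p := pvKeep) (f := id) (l := s.toList) (acc := ([] : List Char))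

theorem bFold_eq (l : List Char) (prev : Option Char) (d : PySem.Dict String Int) :
    (l.foldl
      (fun (s : Option Char × PySem.Dict String Int) c =>
        if pvKeep c then
          (some c,
            match s.1 with
            | some p => pvBump s.2 (String.mk [p, c])
            | none => s.2)
        else s)
      (prev, d)).2 = pairsFold (l.filter pvKeep) prev d := by
  induction l generalizing prev d with
  | nil => rfl
  | cons c cs ih =>
    by_cases h : pvKeep c = true
    · simp only [List.foldl_cons, List.filter_cons, h, if_pos h]
      cases prev with
      | none => simpa using ih (some c) d
      | some p => simpa [pairsFold] using ih (some c) (pvBump d (String.mk [p, c]))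
    · simp only [List.foldl_cons, List.filter_cons, h, if_neg h]
      simpa [h] using ih prev d

theorem aLoop_eq (t : List Char) (n k : Nat) (d : PySem.Dict String Int)
    (hn : t.length - k = n) :
    (PySem.List.pyRange (k : Int) ((t.length : Int) - 1) 1).foldl
      (fun tuples i =>
        pvBump tuples (String.mk [PySem.List.pyGetD t i ' ', PySem.List.pyGetD t (i + 1) ' ']))
      d = pairsFold (t.drop k) none d := by
  induction n generalizing k d with
  | zero =>
    have hk : t.length ≤ k := by omega
    rw [PySem.List.pyRange_one_eq_nil (by push_cast; omega)]
    rw [pairsFold_short _ _ (by simp; omega)]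
    rfl
  | succ n ih =>
    by_cases h : k + 1 < t.length
    · have h0 : k < t.length := by omega
      rw [PySem.List.pyRange_one_cons (by push_cast; omega)]
      simp only [List.foldl_cons]
      have e1 : PySem.List.pyGetD t (k : Int) ' ' = t[k] := by
        rw [PySem.List.pyGetD_natCast, List.getD_eq_getElem t ' ' h0]
      have e2 : PySem.List.pyGetD t ((k : Int) + 1) ' ' = t[k + 1] := by
        have : (k : Int) + 1 = ((k + 1 : Nat) : Int) := by push_cast; ring
        rw [this, PySem.List.pyGetD_natCast, List.getD_eq_getElem t ' ' h]
      rw [e1, e2]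
      have hcast : (k : Int) + 1 = ((k + 1 : Nat) : Int) := by push_cast; ring
      rw [hcast, ih (k + 1) _ (by omega)]
      have hd1 : t.drop k = t[k] :: t.drop (k + 1) := List.drop_eq_getElem_cons h0
      have hd2 : t.drop (k + 1) = t[k + 1] :: t.drop (k + 2) := List.drop_eq_getElem_cons h
      rw [hd1, hd2]
      rfl
    · rw [PySem.List.pyRange_one_eq_nil (by push_cast; omega)]
      rw [pairsFold_short _ _ (by simp; omega)]
      rfl

-- ===== VERDICT (by name: the statement is the Claim_ definition above) =====
theorem countTuples_spec : Claim_equal_countTuples := by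
  intro text doubles _
  unfold Spec_countTuples countTuples countTuples_alt
  rw [bFold_eq text.toList none PySem.Dict.empty]
  simp only [filter_non_alpha_eq]
  have h := aLoop_eq (text.toList.filter pvKeep) (text.toList.filter pvKeep).length 0
      PySem.Dict.empty (by omega)
  simp only [Nat.cast_zero, List.drop_zero] at h
  rw [h]
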